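-- pv_equiv track=rewrite | github.com/loning/mbook-binary | src/binaryuniverse/tests/test_T10_2.py | enforce_no11_constraint
-- ===== SOURCE A (Python) =====
-- def enforce_no11_constraint(binary_str: str) -> str:
--     """强制执行no-11约束"""
--     result = ""
--     i = 0
--
--     while i < len(binary_str):
--         if i < len(binary_str) - 1 and binary_str[i] == '1' and binary_str[i+1] == '1':
--             result += "10"
--             i += 2
--         else:
--             result += binary_str[i]
--             i += 1
--
--     return result
-- ===== SOURCE B (Python) =====
-- from itertools import groupby
--
-- def enforce_no11_constraint(binary_str: str) -> str:
--     """强制执行no-11约束"""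
--     parts = []
--     for ch, grp in groupby(binary_str):
--         n = sum(1 for _ in grp)
--         if ch == '1':
--             parts.append("10" * (n // 2) + "1" * (n % 2))
--         else:
--             parts.append(ch * n)
--     return "".join(parts)
-- ===== Notes on version B (the rewrite author's own statement) =====
-- stated objective: alternative
-- what changed: A's index-driven while-loop with a two-character lookahead is replaced by run-length encoding (itertools.groupby): the string is split into maximal runs of equal characters and each run of k ones is rewritten arithmetically as k//2 copies of the pair one-zero plus a trailing one when k is odd, while runs of other characters pass through; correct because A's greedy +2 skip pairs up ones exactly within each maximal run; B also avoids A's quadratic string concatenation via a final join.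
import Mathlib
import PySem

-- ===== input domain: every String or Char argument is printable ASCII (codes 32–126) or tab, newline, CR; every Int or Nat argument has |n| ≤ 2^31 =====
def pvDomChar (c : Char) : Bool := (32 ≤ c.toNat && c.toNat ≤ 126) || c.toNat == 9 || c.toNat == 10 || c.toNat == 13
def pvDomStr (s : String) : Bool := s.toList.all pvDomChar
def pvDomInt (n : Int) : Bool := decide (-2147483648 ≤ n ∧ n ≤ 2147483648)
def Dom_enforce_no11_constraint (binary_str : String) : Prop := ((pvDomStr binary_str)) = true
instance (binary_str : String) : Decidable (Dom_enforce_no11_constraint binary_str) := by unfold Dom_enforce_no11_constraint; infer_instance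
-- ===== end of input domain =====

-- B replaces A's index-driven while-loop with run-length encoding: group the string into
-- maximal runs of equal characters and rewrite each run of k ones arithmetically as k//2 pairs plus a possible trailing one, i.e.
-- "10"*(k/2) + "1"*(k%2) (alternative decomposition; same behaviour).

-- ===== PORT A =====
-- the while-loop: state (result, remaining suffix); the lookahead branch consumes two chars, else one
def enforceGoA (result : List Char) (l : List Char) : List Char :=
  match l with
  | c1 :: c2 :: rest =>
      if c1 = '1' ∧ c2 = '1' then enforceGoA (result ++ ['1', '0']) rest
      else enforceGoA (result ++ [c1]) (c2 :: rest)
  | [c] => result ++ [c]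
  | [] => result
termination_by l.length

def enforce_no11_constraint (binary_str : String) : String :=
  String.ofList (enforceGoA [] binary_str.toList)

-- ===== PORT B =====
-- itertools.groupby: the list of (character, run length) for maximal equal runs
def runsB : List Char → List (Char × Nat)
  | [] => []
  | c :: t =>
      (c, (t.takeWhile (· = c)).length + 1) :: runsB (t.dropWhile (· = c))
termination_by l => l.length
decreasing_by
  exact Nat.lt_succ_of_le (List.length_dropWhile_le _ _)

-- one run's contribution: "10"*(n//2) + "1"*(n%2) for ones, ch*n otherwise
def partB : Char × Nat → List Char
  | (c, n) =>
      if c = '1' then (List.replicate (n / 2) ['1', '0']).flatten ++ List.replicate (n % 2) '1'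
      else List.replicate n c

def enforce_no11_constraint_alt (binary_str : String) : String :=
  String.ofList (((runsB binary_str.toList).map partB).flatten)

-- ===== PRECONDITION & SPEC =====
def Spec_enforce_no11_constraint (binary_str : String) (out : String) : Prop := out = enforce_no11_constraint_alt binary_str
instance (binary_str : String) (out : String) : Decidable (Spec_enforce_no11_constraint binary_str out) := by unfold Spec_enforce_no11_constraint; infer_instance

-- ===== CLAIM (what is proved, stated in full; the proofs are below) =====
def Claim_equal_enforce_no11_constraint : Prop := ∀ (binary_str : String), Dom_enforce_no11_constraint binary_str → Spec_enforce_no11_constraint binary_str (enforce_no11_constraint binary_str)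

-- ===== LEMMAS AND PROOFS =====

-- the functional core of A's loop
def no11F : List Char → List Char
  | c1 :: c2 :: rest =>
      if c1 = '1' ∧ c2 = '1' then '1' :: '0' :: no11F rest
      else c1 :: no11F (c2 :: rest)
  | [c] => [c]
  | [] => []
termination_by l => l.length

theorem enforceGoA_eq (l : List Char) : ∀ result, enforceGoA result l = result ++ no11F l := by
  induction l using no11F.induct with
  | case1 c1 c2 rest h ih =>
      intro result
      rw [enforceGoA, no11F]
      simp [h, ih]
  | case2 c1 c2 rest h ih =>
      intro result
      rw [enforceGoA, no11F]
      simp [h, ih]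
  | case3 c => intro result; rw [enforceGoA, no11F]
  | case4 => intro result; simp [enforceGoA, no11F]

-- what A's scan does to a run of k ones (when the rest does not start with '1')
def onesOut : Nat → List Char
  | 0 => []
  | 1 => ['1']
  | k + 2 => '1' :: '0' :: onesOut k

theorem no11F_pass (c : Char) (hc : c ≠ '1') (rest : List Char) :
    no11F (c :: rest) = c :: no11F rest := by
  match rest with
  | [] => rw [no11F, no11F]
  | c2 :: t => rw [no11F, if_neg (fun h => hc h.1)]

theorem no11F_run (c : Char) (hc : c ≠ '1') : ∀ (n : Nat) (rest : List Char),
    no11F (List.replicate n c ++ rest) = List.replicate n c ++ no11F rest := by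
  intro n
  induction n with
  | zero => simp
  | succ m ih =>
      intro rest
      simp only [List.replicate_succ, List.cons_append]
      rw [no11F_pass c hc, ih]

theorem no11F_ones : ∀ (k : Nat) (rest : List Char), rest.head? ≠ some '1' →
    no11F (List.replicate k '1' ++ rest) = onesOut k ++ no11F rest := by
  intro k
  induction k using onesOut.induct with
  | case1 => intro rest _; simp [onesOut]
  | case2 =>
      intro rest h
      rw [onesOut]
      match rest with
      | [] => simp [no11F]
      | c :: t =>
          have hc : c ≠ '1' := by simpa using h
          simp only [List.replicate_succ, List.replicate_zero, List.nil_append,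
            List.cons_append]
          rw [no11F, if_neg (fun hh => hc hh.2)]
  | case3 k ih =>
      intro rest h
      rw [onesOut]
      simp only [List.replicate_succ, List.cons_append]
      rw [no11F]
      simp [ih rest h]

theorem onesOut_eq (k : Nat) :
    onesOut k = (List.replicate (k / 2) ['1', '0']).flatten ++ List.replicate (k % 2) '1' := by
  induction k using onesOut.induct with
  | case1 => simp [onesOut]
  | case2 => simp [onesOut]
  | case3 k ih =>
      rw [onesOut, ih]
      have h2 : (k + 2) / 2 = k / 2 + 1 := by omega
      have h3 : (k + 2) % 2 = k % 2 := by omega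
      rw [h2, h3, List.replicate_succ, List.flatten_cons]
      simp

theorem no11F_runsB : ∀ (l : List Char), no11F l = ((runsB l).map partB).flatten := by
  intro l
  induction l using runsB.induct with
  | case1 => simp [runsB, no11F]
  | case2 c t ih =>
      rw [runsB]
      simp only [List.map_cons, List.flatten_cons, ← ih]
      have hsplit : c :: t =
          List.replicate ((t.takeWhile (· = c)).length + 1) c ++ t.dropWhile (· = c) := by
        have hgrep : t.takeWhile (· = c) = List.replicate (t.takeWhile (· = c)).length c := by
          apply List.eq_replicate_of_mem
          intro x hx
          have := List.mem_takeWhile_imp hx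
          simpa using this
        calc c :: t = c :: (t.takeWhile (· = c) ++ t.dropWhile (· = c)) := by
              rw [List.takeWhile_append_dropWhile]
          _ = _ := by rw [List.replicate_succ, List.cons_append, ← hgrep]
      have hhead : (t.dropWhile (· = c)).head? ≠ some c := by
        intro hcon
        have h1 := List.head?_dropWhile_not (fun x => decide (x = c)) t
        simp only [hcon] at h1
        simp at h1
      rw [hsplit]
      by_cases hc : c = '1'
      · subst hc
        rw [no11F_ones _ _ hhead, onesOut_eq, partB]
        simp
      · rw [no11F_run c hc, partB]
        simp [hc]

-- ===== VERDICT (by name: the statement is the Claim_ definition above) =====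
theorem enforce_no11_constraint_spec : Claim_equal_enforce_no11_constraint := by
  intro s _
  unfold Spec_enforce_no11_constraint enforce_no11_constraint enforce_no11_constraint_alt
  rw [enforceGoA_eq, no11F_runsB]
  simp
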